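-- pv_equiv track=rewrite | github.com/shanthan-t/robotics-path-learning | main.py | get_path_coordinates
-- ===== SOURCE A (Python) =====
-- START = (5, 5)
--
-- def get_path_coordinates(individual):
--     path_coords = [START]
--     current_pos = START
--     for move in individual:
--         next_pos = (current_pos[0] + move[0], current_pos[1] + move[1])
--         path_coords.append(next_pos)
--         current_pos = next_pos
--     return path_coords
-- ===== SOURCE B (Python) =====
-- START = (5, 5)
--
-- def _prefix(start, deltas):
--     out = [start]
--     t = start
--     for d in deltas:
--         t += d
--         out.append(t)
--     return out
--
-- def get_path_coordinates(individual):
--     xs = _prefix(START[0], [m[0] for m in individual])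
--     ys = _prefix(START[1], [m[1] for m in individual])
--     return list(zip(xs, ys))
-- ===== Notes on version B (the rewrite author's own statement) =====
-- stated objective: alternative
-- what changed: Replaces the single fused loop threading a 2D current position with two independent 1D prefix-sum passes over the x- and y-components, recombined with zip.
import Mathlib
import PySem

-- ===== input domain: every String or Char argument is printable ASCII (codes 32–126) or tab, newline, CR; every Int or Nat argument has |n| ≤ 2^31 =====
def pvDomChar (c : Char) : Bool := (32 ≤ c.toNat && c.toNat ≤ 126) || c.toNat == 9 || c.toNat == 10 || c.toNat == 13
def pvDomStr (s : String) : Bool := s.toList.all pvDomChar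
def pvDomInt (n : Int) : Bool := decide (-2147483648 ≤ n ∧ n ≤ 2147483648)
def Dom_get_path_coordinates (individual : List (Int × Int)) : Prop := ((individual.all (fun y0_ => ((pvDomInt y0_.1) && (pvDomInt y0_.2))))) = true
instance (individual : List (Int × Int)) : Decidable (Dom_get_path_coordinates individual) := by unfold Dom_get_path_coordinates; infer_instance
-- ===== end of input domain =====

-- B replaces A's single fused loop over a 2D position with two independent 1D
-- prefix-sum passes (x and y) recombined by zip; equivalent, alternative decomposition.

-- ===== PORT A =====
-- one loop threading (path_coords, current_pos) through the moves
def get_path_coordinates (individual : List (Int × Int)) : List (Int × Int) :=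
  (individual.foldl
    (fun (st : List (Int × Int) × (Int × Int)) move =>
      (st.1 ++ [(st.2.1 + move.1, st.2.2 + move.2)], (st.2.1 + move.1, st.2.2 + move.2)))
    ([(5, 5)], (5, 5))).1

-- ===== PORT B =====
-- 1D prefix sums: loop threading (out, t) through the deltas (B's _prefix)
def pvPrefix (start : Int) (deltas : List Int) : List Int :=
  (deltas.foldl (fun (st : List Int × Int) d => (st.1 ++ [st.2 + d], st.2 + d))
    ([start], start)).1

def get_path_coordinates_alt (individual : List (Int × Int)) : List (Int × Int) :=
  (pvPrefix 5 (individual.map (fun m => m.1))).zip (pvPrefix 5 (individual.map (fun m => m.2)))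

-- ===== PRECONDITION & SPEC =====
def Spec_get_path_coordinates (individual : List (Int × Int)) (out : List (Int × Int)) : Prop := out = get_path_coordinates_alt individual
instance (individual : List (Int × Int)) (out : List (Int × Int)) : Decidable (Spec_get_path_coordinates individual out) := by unfold Spec_get_path_coordinates; infer_instance

-- ===== CLAIM (what is proved, stated in full; the proofs are below) =====
def Claim_equal_get_path_coordinates : Prop := ∀ (individual : List (Int × Int)), Dom_get_path_coordinates individual → Spec_get_path_coordinates individual (get_path_coordinates individual)

-- ===== LEMMAS AND PROOFS =====

-- the tail of positions A appends after (x, y)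
def pvTrailA (x y : Int) : List (Int × Int) → List (Int × Int)
  | [] => []
  | m :: ms => (x + m.1, y + m.2) :: pvTrailA (x + m.1) (y + m.2) ms

-- the tail of sums B's _prefix appends after t
def pvTrailP (t : Int) : List Int → List Int
  | [] => []
  | d :: ds => (t + d) :: pvTrailP (t + d) ds

theorem pvFoldA_eq (ind : List (Int × Int)) : ∀ (path : List (Int × Int)) (x y : Int),
    (ind.foldl
      (fun (st : List (Int × Int) × (Int × Int)) move =>
        (st.1 ++ [(st.2.1 + move.1, st.2.2 + move.2)], (st.2.1 + move.1, st.2.2 + move.2)))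
      (path, (x, y))).1 = path ++ pvTrailA x y ind := by
  induction ind with
  | nil => intro path x y; simp [pvTrailA]
  | cons m ms ih => intro path x y; simp [List.foldl, pvTrailA, ih, List.append_assoc]

theorem pvFoldP_eq (ds : List Int) : ∀ (out : List Int) (t : Int),
    (ds.foldl (fun (st : List Int × Int) d => (st.1 ++ [st.2 + d], st.2 + d))
      (out, t)).1 = out ++ pvTrailP t ds := by
  induction ds with
  | nil => intro out t; simp [pvTrailP]
  | cons d ds ih => intro out t; simp [List.foldl, pvTrailP, ih, List.append_assoc]

theorem pvTrail_zip (ind : List (Int × Int)) : ∀ (x y : Int),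
    pvTrailA x y ind =
      (pvTrailP x (ind.map (fun m => m.1))).zip (pvTrailP y (ind.map (fun m => m.2))) := by
  induction ind with
  | nil => intro x y; simp [pvTrailA, pvTrailP]
  | cons m ms ih => intro x y; simp [pvTrailA, pvTrailP, List.zip, ih]

-- ===== VERDICT (by name: the statement is the Claim_ definition above) =====
theorem get_path_coordinates_spec : Claim_equal_get_path_coordinates := by
  intro ind _
  unfold Spec_get_path_coordinates get_path_coordinates get_path_coordinates_alt pvPrefix
  rw [pvFoldA_eq, pvFoldP_eq, pvFoldP_eq, pvTrail_zip]
  simp [List.zip]
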